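-- pv_equiv track=rewrite | github.com/dsrhaslab/criba | correlation_algorithms/transversals.py | isBFS
-- ===== SOURCE A (Python) =====
-- def isBFS(listFiles):
--     order = list(map(lambda f: len(f.split("/")), listFiles))
--
--     greatest = -1
--     for i in order:
--         if i < greatest:
--             return False
--         greatest = i
--
--     return True
-- ===== SOURCE B (Python) =====
-- def isBFS(listFiles):
--     order = list(map(lambda f: len(f.split("/")), listFiles))
--     return order == sorted(order)
-- ===== Notes on version B (the rewrite author's own statement) =====
-- stated objective: idiomatic
-- what changed: Replaces the running-greatest scan with sort-then-compare: the depth list is non-decreasing iff it equals its own sorted copy.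
import Mathlib
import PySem

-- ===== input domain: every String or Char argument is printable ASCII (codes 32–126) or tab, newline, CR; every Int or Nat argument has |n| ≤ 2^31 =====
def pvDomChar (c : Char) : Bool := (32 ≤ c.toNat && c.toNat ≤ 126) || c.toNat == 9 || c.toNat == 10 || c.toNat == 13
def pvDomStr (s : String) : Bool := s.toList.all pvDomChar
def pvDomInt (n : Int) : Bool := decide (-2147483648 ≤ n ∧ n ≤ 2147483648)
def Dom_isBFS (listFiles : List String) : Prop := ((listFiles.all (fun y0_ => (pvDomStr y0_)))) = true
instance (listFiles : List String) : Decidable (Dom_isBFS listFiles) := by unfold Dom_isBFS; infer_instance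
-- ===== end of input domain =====

-- B replaces A's running-greatest scan by sort-then-compare (order == sorted(order)); equal return values proved below.
-- ===== PORT A =====
-- 'f.split("/")': sep is the non-empty literal "/", so PySem.Chars.splitOn (the sep ≠ "" form) is exact here.
def pyDepth (f : String) : Int :=
  ((PySem.Chars.splitOn f.toList "/".toList).length : Int)

-- the loop 'greatest = -1; for i in order: if i < greatest: return False; greatest = i; return True'
def isBFS_loop : List Int → Int → Bool
  | [], _ => true
  | i :: rest, greatest => if i < greatest then false else isBFS_loop rest i

def isBFS (listFiles : List String) : Bool :=
  isBFS_loop (listFiles.map pyDepth) (-1)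

-- ===== PORT B =====
def isBFS_alt (listFiles : List String) : Bool :=
  let order := listFiles.map pyDepth
  order == PySem.List.sorted order (fun x => x) false

-- ===== PRECONDITION & SPEC =====
def Spec_isBFS (listFiles : List String) (out : Bool) : Prop := out = isBFS_alt listFiles
instance (listFiles : List String) (out : Bool) : Decidable (Spec_isBFS listFiles out) := by unfold Spec_isBFS; infer_instance

-- ===== CLAIM (what is proved, stated in full; the proofs are below) =====
def Claim_equal_isBFS : Prop := ∀ (listFiles : List String), Dom_isBFS listFiles → Spec_isBFS listFiles (isBFS listFiles)

-- ===== LEMMAS AND PROOFS =====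

theorem isBFS_loop_iff_isChain (l : List Int) (g : Int) :
    isBFS_loop l g = true ↔ List.IsChain (fun a b : Int => a ≤ b) (g :: l) := by
  induction l generalizing g with
  | nil => simp [isBFS_loop]
  | cons i rest ih =>
      rw [isBFS_loop, List.isChain_cons_cons]
      by_cases h : i < g
      · simp [h, not_le.mpr h]
      · simp [h, not_lt.mp h, ih]

theorem sorted_eq_iff_pairwise (l : List Int) :
    (l = PySem.List.sorted l (fun x => x) false) ↔ l.Pairwise (· ≤ ·) := by
  constructor
  · intro h
    rw [h]
    exact PySem.List.sorted_pairwise l (fun x => x)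
  · intro h
    exact (PySem.List.sorted_eq_self_of_pairwise l (fun x => x) h).symm

-- ===== VERDICT (by name: the statement is the Claim_ definition above) =====
theorem isBFS_spec : Claim_equal_isBFS := by
  intro listFiles _
  unfold Spec_isBFS isBFS isBFS_alt
  set order := listFiles.map pyDepth with horder
  have hnn : ∀ b ∈ order, (-1 : Int) ≤ b := by
    intro b hb
    rw [horder] at hb
    obtain ⟨f, _, rfl⟩ := List.mem_map.mp hb
    unfold pyDepth
    omega
  rw [Bool.eq_iff_iff, beq_iff_eq, isBFS_loop_iff_isChain,
    List.isChain_iff_pairwise, List.pairwise_cons, sorted_eq_iff_pairwise]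
  exact ⟨fun h => h.2, fun h => ⟨hnn, h⟩⟩
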